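-- pv_equiv track=rewrite | github.com/pr1malator/pr1maly | src/processor.py | _count_multikill_rounds
-- ===== SOURCE A (Python) =====
-- from typing import Any
--
-- def _count_multikill_rounds(
--     round_stats: list[dict[str, Any]],
-- ) -> dict[int, int]:
--     """Count rounds where the player got exactly 2, 3, 4, or 5+ kills."""
--     counts = {2: 0, 3: 0, 4: 0, 5: 0}
--     for rs in round_stats:
--         k = rs["kills"]
--         if k >= 5:
--             counts[5] += 1
--         elif k in counts:
--             counts[k] += 1
--     return counts
-- ===== SOURCE B (Python) =====
-- def _count_multikill_rounds(round_stats):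
--     """Count rounds where the player got exactly 2, 3, 4, or 5+ kills."""
--     ks = [rs["kills"] for rs in round_stats]
--     g2 = sum(1 for k in ks if k >= 2)
--     g3 = sum(1 for k in ks if k >= 3)
--     g4 = sum(1 for k in ks if k >= 4)
--     g5 = sum(1 for k in ks if k >= 5)
--     return {2: g2 - g3, 3: g3 - g4, 4: g4 - g5, 5: g5}
-- ===== Notes on version B (the rewrite author's own statement) =====
-- stated objective: alternative
-- what changed: Replaces A's per-round if/elif bucket tally into a mutable dict with a threshold-CDF decomposition: count rounds with kills >= t for t=2..5, then obtain each exact bucket by differencing adjacent threshold counts (counts[k] = g_k - g_{k+1}, counts[5] = g_5).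
import Mathlib
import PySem

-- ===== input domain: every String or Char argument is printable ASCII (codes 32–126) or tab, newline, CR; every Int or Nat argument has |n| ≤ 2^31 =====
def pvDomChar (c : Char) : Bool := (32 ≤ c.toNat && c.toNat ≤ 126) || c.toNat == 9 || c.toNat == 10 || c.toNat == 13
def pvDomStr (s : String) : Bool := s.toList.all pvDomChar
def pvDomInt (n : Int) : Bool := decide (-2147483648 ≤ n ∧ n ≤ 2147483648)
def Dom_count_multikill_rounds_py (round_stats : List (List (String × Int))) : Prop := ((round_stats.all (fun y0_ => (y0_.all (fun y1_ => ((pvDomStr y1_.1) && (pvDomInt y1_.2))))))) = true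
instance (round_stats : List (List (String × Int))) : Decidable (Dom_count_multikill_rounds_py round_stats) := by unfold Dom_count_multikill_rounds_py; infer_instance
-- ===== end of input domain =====

-- B replaces A's per-round if/elif bucket tally with threshold counts (kills >= t for t = 2..5) differenced into exact buckets (objective: alternative).

-- ===== PORT A =====
-- rs["kills"]; Pre_ guarantees the key is present, so the getD 0 default is never reached
def cmKills (rs : List (String × Int)) : Int := ((PySem.Dict.mk rs).get? "kills").getD 0

def count_multikill_rounds_py (round_stats : List (List (String × Int))) : List (Int × Int) :=
  let init : PySem.Dict Int Int := PySem.Dict.mk [(2, 0), (3, 0), (4, 0), (5, 0)]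
  (round_stats.foldl (fun counts rs =>
      let k := cmKills rs
      if 5 ≤ k then counts.modify 5 0 (· + 1)
      else if counts.contains k then counts.modify k 0 (· + 1)
      else counts) init).items

-- ===== PORT B =====
def count_multikill_rounds_py_alt (round_stats : List (List (String × Int))) : List (Int × Int) :=
  let ks := round_stats.map cmKills
  let g2 : Int := (ks.countP (fun k => decide (2 ≤ k)) : Int)
  let g3 : Int := (ks.countP (fun k => decide (3 ≤ k)) : Int)
  let g4 : Int := (ks.countP (fun k => decide (4 ≤ k)) : Int)
  let g5 : Int := (ks.countP (fun k => decide (5 ≤ k)) : Int)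
  [(2, g2 - g3), (3, g3 - g4), (4, g4 - g5), (5, g5)]

-- ===== PRECONDITION & SPEC =====
-- Pre_ excludes rounds without a "kills" key, on which Python A raises KeyError.
def Pre_count_multikill_rounds_py (round_stats : List (List (String × Int))) : Prop :=
  ∀ rs ∈ round_stats, "kills" ∈ rs.map Prod.fst
instance (round_stats : List (List (String × Int))) : Decidable (Pre_count_multikill_rounds_py round_stats) := by unfold Pre_count_multikill_rounds_py; infer_instance

def pvWitness_count_multikill_rounds_py : (List (List (String × Int))) :=
  [[("kills", 3)], [("kills", 7)], [("kills", 0)]]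

def Spec_count_multikill_rounds_py (round_stats : List (List (String × Int))) (out : List (Int × Int)) : Prop := out = count_multikill_rounds_py_alt round_stats
instance (round_stats : List (List (String × Int))) (out : List (Int × Int)) : Decidable (Spec_count_multikill_rounds_py round_stats out) := by unfold Spec_count_multikill_rounds_py; infer_instance

-- ===== CLAIM (what is proved, stated in full; the proofs are below) =====
def Claim_equal_count_multikill_rounds_py : Prop := ∀ (round_stats : List (List (String × Int))), Dom_count_multikill_rounds_py round_stats → Pre_count_multikill_rounds_py round_stats → Spec_count_multikill_rounds_py round_stats (count_multikill_rounds_py round_stats)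

-- ===== LEMMAS AND PROOFS =====

-- one step of A's loop on the 4-key counts dict, as four conditional increments
theorem cmA_step_eval (rs : List (String × Int)) (a b c d : Int) :
    (let k := cmKills rs
     if 5 ≤ k then (PySem.Dict.mk [((2:Int), a), (3, b), (4, c), (5, d)]).modify 5 0 (· + 1)
     else if (PySem.Dict.mk [((2:Int), a), (3, b), (4, c), (5, d)]).contains k then
       (PySem.Dict.mk [((2:Int), a), (3, b), (4, c), (5, d)]).modify k 0 (· + 1)
     else PySem.Dict.mk [((2:Int), a), (3, b), (4, c), (5, d)]) =
    PySem.Dict.mk [(2, a + if cmKills rs = 2 then 1 else 0),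
                   (3, b + if cmKills rs = 3 then 1 else 0),
                   (4, c + if cmKills rs = 4 then 1 else 0),
                   (5, d + if 5 ≤ cmKills rs then 1 else 0)] := by
  by_cases h5 : 5 ≤ cmKills rs
  · have h2 : ¬ cmKills rs = 2 := by omega
    have h3 : ¬ cmKills rs = 3 := by omega
    have h4 : ¬ cmKills rs = 4 := by omega
    simp [PySem.Dict.modify, PySem.Dict.contains, PySem.Dict.getD, PySem.Dict.get?,
          PySem.Dict.insert, h2, h3, h4, h5]
  · by_cases h2 : cmKills rs = 2
    · simp [h2, PySem.Dict.modify, PySem.Dict.contains, PySem.Dict.getD, PySem.Dict.get?,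
            PySem.Dict.insert]
    · by_cases h3 : cmKills rs = 3
      · simp [h3, PySem.Dict.modify, PySem.Dict.contains, PySem.Dict.getD, PySem.Dict.get?,
              PySem.Dict.insert]
      · by_cases h4 : cmKills rs = 4
        · simp [h4, PySem.Dict.modify, PySem.Dict.contains, PySem.Dict.getD, PySem.Dict.get?,
                PySem.Dict.insert]
        · have h5' : ¬ cmKills rs = 5 := by omega
          simp only [PySem.Dict.contains, h2, h3, h4, h5]
          simp
          rintro (h | h | h | h) <;> exfalso <;> omega

-- closed form of A's fold, with the four accumulator values generalised
theorem cmA_fold (l : List (List (String × Int))) (a b c d : Int) :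
    l.foldl (fun counts rs =>
      let k := cmKills rs
      if 5 ≤ k then counts.modify 5 0 (· + 1)
      else if counts.contains k then counts.modify k 0 (· + 1)
      else counts) (PySem.Dict.mk [(2, a), (3, b), (4, c), (5, d)]) =
    PySem.Dict.mk [(2, a + ((l.map cmKills).count 2 : Int)),
                   (3, b + ((l.map cmKills).count 3 : Int)),
                   (4, c + ((l.map cmKills).count 4 : Int)),
                   (5, d + (((l.map cmKills).countP (fun k => decide (5 ≤ k))) : Int))] := by
  induction l generalizing a b c d with
  | nil => simp
  | cons rs t ih =>
    simp only [List.foldl_cons]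
    rw [cmA_step_eval, ih]
    simp only [List.map_cons, List.count_cons, List.countP_cons, PySem.Dict.mk.injEq,
               List.cons.injEq, Prod.mk.injEq, true_and, and_true]
    refine ⟨?_, ?_, ?_, ?_⟩ <;> split_ifs <;> simp_all <;> omega

-- the threshold count at v splits into the exact count at v plus the threshold count at v+1
theorem cm_countP_split (l : List Int) (v : Int) :
    l.countP (fun k => decide (v ≤ k)) = l.count v + l.countP (fun k => decide (v + 1 ≤ k)) := by
  induction l with
  | nil => simp
  | cons x t ih =>
    simp only [List.countP_cons, List.count_cons, ih]
    by_cases hx : x = v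
    · subst hx; simp; omega
    · by_cases hge : v + 1 ≤ x
      · have : v ≤ x := by omega
        simp [hx, hge, this]; omega
      · by_cases h : v ≤ x
        · omega
        · simp [hx, hge, h]

-- ===== VERDICT (by name: the statement is the Claim_ definition above) =====
theorem count_multikill_rounds_py_spec : Claim_equal_count_multikill_rounds_py := by
  intro l _ _
  show count_multikill_rounds_py l = count_multikill_rounds_py_alt l
  simp only [count_multikill_rounds_py, count_multikill_rounds_py_alt]
  rw [cmA_fold]
  have h2 := cm_countP_split (l.map cmKills) 2
  have h3 := cm_countP_split (l.map cmKills) 3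
  have h4 := cm_countP_split (l.map cmKills) 4
  norm_num at h2 h3 h4 ⊢
  refine ⟨?_, ?_, ?_⟩ <;> omega
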